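-- pv_equiv track=rewrite | github.com/aryashjain1/ComputingFundamentals | CODE2140/HW2/HW2Prob8Jain.py | num_stats
-- ===== SOURCE A (Python) =====
-- def num_stats(in_list):
--     in_list.sort()
--     num_freqs = {}
--     num_list = []
--     for i in range(len(in_list)):
--         if in_list[i] not in num_freqs:
--             num_freqs[in_list[i]] = 1
--             num_list.append(in_list[i])
--         else:
--             num_freqs[in_list[i]] += 1
--     num_list.sort(reverse=True)
--     return (num_freqs, num_list)
-- ===== SOURCE B (Python) =====
-- def num_stats(in_list):
--     in_list.sort()
--     n = len(in_list)
--     rs = []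
--     i = 0
--     while i < n:
--         j = i + 1
--         while j < n and in_list[j] == in_list[i]:
--             j += 1
--         rs.append((in_list[i], j - i))
--         i = j
--     num_freqs = {}
--     for k, c in rs:
--         num_freqs[k] = c
--     num_list = [k for k, _ in rs]
--     num_list.reverse()
--     return (num_freqs, num_list)
-- ===== Notes on version B (the rewrite author's own statement) =====
-- stated objective: alternative
-- what changed: Replaces the per-element dict-membership loop and the final reverse sort by run-grouping of the sorted list: consecutive equal runs give each key and its count directly, and the descending unique list is just the run keys reversed.
import Mathlib
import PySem

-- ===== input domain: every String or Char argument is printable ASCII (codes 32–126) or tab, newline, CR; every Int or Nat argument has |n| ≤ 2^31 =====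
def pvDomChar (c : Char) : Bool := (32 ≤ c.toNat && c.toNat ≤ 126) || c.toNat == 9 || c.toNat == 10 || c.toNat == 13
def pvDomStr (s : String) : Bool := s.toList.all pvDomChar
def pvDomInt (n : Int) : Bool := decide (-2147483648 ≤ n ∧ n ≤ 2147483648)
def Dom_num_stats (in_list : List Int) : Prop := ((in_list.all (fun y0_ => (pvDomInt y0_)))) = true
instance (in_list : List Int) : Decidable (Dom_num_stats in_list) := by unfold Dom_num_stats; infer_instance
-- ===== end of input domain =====

-- B groups the sorted list into consecutive equal runs instead of A's per-element dict-membership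
-- loop, and reverses the run keys instead of A's second (descending) sort.
-- NOTE: A sorts its argument in place (in_list.sort()); B performs the same mutation; the
-- equivalence proved here is about the RETURN value.

-- ===== PORT A =====
def num_stats (in_list : List Int) : (List (Int × Int)) × List Int :=
  let l := PySem.List.sorted in_list (fun x => x) false      -- in_list.sort()
  let st := (PySem.List.pyRange 0 (PySem.List.len l)).foldl  -- for i in range(len(in_list)):
      (fun (st : PySem.Dict Int Int × List Int) i =>
        let x := PySem.List.pyGetD l i 0                     -- in_list[i] (i always in range)
        if st.1.contains x then
          (st.1.insert x (st.1.getD x 0 + 1), st.2)          -- num_freqs[in_list[i]] += 1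
        else
          (st.1.insert x 1, st.2 ++ [x]))                    -- num_freqs[...] = 1; num_list.append(...)
      (PySem.Dict.empty, [])
  (st.1.items, PySem.List.sorted st.2 (fun x => x) true)     -- num_list.sort(reverse=True)

-- ===== PORT B =====
-- inner while loop: 'j = i + 1; while j < n and in_list[j] == in_list[i]: j += 1'
def pvScanRun (l : List Int) (x : Int) (j : Nat) : Nat :=
  if h : j < l.length ∧ PySem.List.pyGetD l (j : Int) 0 = x then pvScanRun l x (j + 1)
  else j
termination_by l.length - j
decreasing_by omega

-- the while loop only moves j forward (cited by pvBuildRuns' decreasing_by)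
theorem pvScanRun_ge (l : List Int) (x : Int) (j : Nat) : j ≤ pvScanRun l x j := by
  fun_induction pvScanRun with
  | case1 j h ih => omega
  | case2 j h => omega

-- outer while loop: scans one run per iteration, appends (value, run length) to rs
def pvBuildRuns (l : List Int) (i : Nat) (rs : List (Int × Int)) : List (Int × Int) :=
  if i < l.length then
    let x := PySem.List.pyGetD l (i : Int) 0
    let j := pvScanRun l x (i + 1)
    pvBuildRuns l j (rs ++ [(x, (j : Int) - (i : Int))])
  else rs
termination_by l.length - i
decreasing_by have := pvScanRun_ge l (PySem.List.pyGetD l (i : Int) 0) (i + 1); omega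

def num_stats_alt (in_list : List Int) : (List (Int × Int)) × List Int :=
  let l := PySem.List.sorted in_list (fun x => x) false      -- in_list.sort()
  let rs := pvBuildRuns l 0 []
  let d := rs.foldl (fun (d : PySem.Dict Int Int) p => d.insert p.1 p.2) PySem.Dict.empty
  (d.items, (rs.map Prod.fst).reverse)

-- ===== PRECONDITION & SPEC =====
def Spec_num_stats (in_list : List Int) (out : (List (Int × Int)) × List Int) : Prop := out = num_stats_alt in_list
instance (in_list : List Int) (out : (List (Int × Int)) × List Int) : Decidable (Spec_num_stats in_list out) := by unfold Spec_num_stats; infer_instance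

-- ===== CLAIM (what is proved, stated in full; the proofs are below) =====
def Claim_equal_num_stats : Prop := ∀ (in_list : List Int), Dom_num_stats in_list → Spec_num_stats in_list (num_stats in_list)

-- ===== LEMMAS AND PROOFS =====

-- proof-side view of the run scan: runs of a list, defined structurally
def pvCountPrefix (xs : List Int) (v : Int) : Nat :=
  match xs with
  | [] => 0
  | x :: t => if x == v then 1 + pvCountPrefix t v else 0

def pvRuns (xs : List Int) : List (Int × Int) :=
  match xs with
  | [] => []
  | head :: tail =>
    let same := pvCountPrefix tail head
    (head, 1 + (same : Int)) :: pvRuns (tail.drop same)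
termination_by xs.length
decreasing_by simp

theorem pvScanRun_eq (l : List Int) (x : Int) (j : Nat) :
    pvScanRun l x j = j + pvCountPrefix (l.drop j) x := by
  fun_induction pvScanRun with
  | case1 j h ih =>
    rw [ih, List.drop_eq_getElem_cons h.1]
    have hx : l[j] = x := by
      have h2 := h.2
      rw [PySem.List.pyGetD_eq_getElem l 0 (by omega) (by exact_mod_cast h.1)] at h2
      simpa using h2
    simp [pvCountPrefix, hx]
    omega
  | case2 j h =>
    by_cases hj : j < l.length
    · have hx : ¬(l[j] = x) := by
        intro e
        exact h ⟨hj, by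
          rw [PySem.List.pyGetD_eq_getElem l 0 (by omega) (by exact_mod_cast hj)]
          simpa using e⟩
      rw [List.drop_eq_getElem_cons hj]
      simp [pvCountPrefix, hx]
    · rw [List.drop_eq_nil_of_le (by omega)]
      simp [pvCountPrefix]

theorem pvBuildRuns_eq (l : List Int) (i : Nat) (rs : List (Int × Int)) :
    pvBuildRuns l i rs = rs ++ pvRuns (l.drop i) := by
  fun_induction pvBuildRuns with
  | case1 i rs h x j ih =>
    rw [ih]
    rw [List.drop_eq_getElem_cons h, pvRuns]
    simp only [List.append_assoc, List.singleton_append]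
    have hget : x = l[i] := by
      show PySem.List.pyGetD l (i : Int) 0 = l[i]
      rw [PySem.List.pyGetD_eq_getElem l 0 (by omega) (by exact_mod_cast h)]
      simp
    have hj : j = i + 1 + pvCountPrefix (l.drop (i + 1)) l[i] := by
      show pvScanRun l x (i + 1) = _
      rw [pvScanRun_eq, hget]
    congr 2
    · rw [hget, hj]
      refine Prod.ext rfl ?_
      push_cast
      ring
    · rw [hj, List.drop_drop]
  | case2 i rs h =>
    rw [List.drop_eq_nil_of_le (by omega)]
    simp [pvRuns]

theorem pvTake_countPrefix (t : List Int) (x : Int) :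
    t.take (pvCountPrefix t x) = List.replicate (pvCountPrefix t x) x := by
  induction t with
  | nil => simp [pvCountPrefix]
  | cons z t' ih =>
    by_cases h : z = x
    · subst h
      simp only [pvCountPrefix, beq_self_eq_true, if_true, Nat.add_comm 1]
      simp [List.replicate_succ, ih]
    · simp [pvCountPrefix, h]

theorem pvLt_drop (t : List Int) (x : Int) (hp : (x :: t).Pairwise (· ≤ ·)) :
    ∀ y ∈ t.drop (pvCountPrefix t x), x < y := by
  induction t with
  | nil => simp [pvCountPrefix]
  | cons z t' ih =>
    by_cases h : z = x
    · subst h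
      have hp' : (z :: t').Pairwise (· ≤ ·) := hp.of_cons
      simp only [pvCountPrefix, beq_self_eq_true, if_true, Nat.add_comm 1, List.drop_succ_cons]
      exact ih hp'
    · have hxz : x ≤ z := (List.pairwise_cons.mp hp).1 z (by simp)
      have hlt : x < z := lt_of_le_of_ne hxz (fun e => h e.symm)
      intro y hy
      simp [pvCountPrefix, h] at hy
      rcases hy with rfl | hy
      · exact hlt
      · have hzy : z ≤ y := (List.pairwise_cons.mp hp.of_cons).1 y hy
        exact lt_of_lt_of_le hlt hzy

theorem pvCount_eq (t : List Int) (x : Int) (h : ∀ y ∈ t.drop (pvCountPrefix t x), y ≠ x) :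
    t.count x = pvCountPrefix t x := by
  conv_lhs => rw [← List.take_append_drop (pvCountPrefix t x) t]
  rw [List.count_append, pvTake_countPrefix, List.count_replicate]
  have h0 : (t.drop (pvCountPrefix t x)).count x = 0 := by
    rw [List.count_eq_zero]
    intro hx
    exact h x hx rfl
  simp [h0]

theorem pvDiscard_ofList (c : Nat) (r : List Int) (x : Int) (hr : x ∉ r) :
    PySem.Set.discard (PySem.Set.ofList (List.replicate c x ++ r)) x = PySem.Set.ofList r := by
  induction c with
  | zero =>
    simp only [List.replicate, List.nil_append, PySem.Set.discard]
    apply List.filter_eq_self.mpr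
    intro y hy
    have : y ∈ r := (PySem.Set.mem_ofList _ _).mp hy
    simp
    exact fun e => hr (e ▸ this)
  | succ c ih =>
    rw [List.replicate_succ, List.cons_append, PySem.Set.ofList_cons]
    simp only [PySem.Set.discard] at *
    rw [List.filter_cons]
    simp only [beq_self_eq_true, Bool.not_true]
    rw [List.filter_filter]
    simpa using ih

theorem pvDedup_cons (t : List Int) (x : Int) (h : ∀ y ∈ t.drop (pvCountPrefix t x), y ≠ x) :
    PySem.List.dedup (x :: t) = x :: PySem.List.dedup (t.drop (pvCountPrefix t x)) := by
  simp only [PySem.List.dedup_eq_ofList]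
  rw [PySem.Set.ofList_cons]
  have hx : x ∉ t.drop (pvCountPrefix t x) := fun hm => h x hm rfl
  have ht : t = List.replicate (pvCountPrefix t x) x ++ t.drop (pvCountPrefix t x) := by
    conv_lhs => rw [← List.take_append_drop (pvCountPrefix t x) t]
    rw [pvTake_countPrefix]
  congr 1
  conv_lhs => rw [ht]
  exact pvDiscard_ofList _ _ _ hx

theorem pvRuns_eq (ys : List Int) (hp : ys.Pairwise (· ≤ ·)) :
    pvRuns ys = (PySem.List.dedup ys).map (fun k => (k, (ys.count k : Int))) := by
  induction ys using pvRuns.induct with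
  | case1 => simp [pvRuns]
  | case2 head tail same ih =>
    have hlt := pvLt_drop tail head hp
    have hne : ∀ y ∈ tail.drop (pvCountPrefix tail head), y ≠ head :=
      fun y hy => ne_of_gt (hlt y hy)
    have hdrop_pw : (tail.drop (pvCountPrefix tail head)).Pairwise (· ≤ ·) :=
      hp.of_cons.sublist (List.drop_sublist _ _)
    rw [pvRuns, pvDedup_cons tail head hne, List.map_cons]
    congr 1
    · have hc : (head :: tail).count head = 1 + pvCountPrefix tail head := by
        rw [List.count_cons_self, pvCount_eq tail head hne]; omega
      rw [hc]; push_cast; ring_nf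
    · rw [ih hdrop_pw]
      apply List.map_congr_left
      intro k hk
      have hkmem : k ∈ tail.drop (pvCountPrefix tail head) := by
        have := (PySem.List.mem_dedup _ _).mp hk
        exact this
      have hkx : k ≠ head := hne k hkmem
      have htail : tail = List.replicate (pvCountPrefix tail head) head ++ tail.drop (pvCountPrefix tail head) := by
        conv_lhs => rw [← List.take_append_drop (pvCountPrefix tail head) tail]
        rw [pvTake_countPrefix]
      have : (head :: tail).count k = (tail.drop (pvCountPrefix tail head)).count k := by
        conv_lhs => rw [htail]
        rw [List.count_cons, List.count_append, List.count_replicate]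
        simp [Ne.symm hkx]
      rw [this]

theorem pvDedup_pairwise_lt (ys : List Int) (hp : ys.Pairwise (· ≤ ·)) :
    (PySem.List.dedup ys).Pairwise (· < ·) := by
  induction ys using pvRuns.induct with
  | case1 => simp [PySem.List.dedup_eq_ofList, PySem.Set.ofList_nil]
  | case2 head tail same ih =>
    have hlt := pvLt_drop tail head hp
    have hne : ∀ y ∈ tail.drop (pvCountPrefix tail head), y ≠ head :=
      fun y hy => ne_of_gt (hlt y hy)
    have hdrop_pw : (tail.drop (pvCountPrefix tail head)).Pairwise (· ≤ ·) :=
      hp.of_cons.sublist (List.drop_sublist _ _)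
    rw [pvDedup_cons tail head hne]
    refine List.pairwise_cons.mpr ⟨?_, ih hdrop_pw⟩
    intro y hy
    exact hlt y ((PySem.List.mem_dedup _ _).mp hy)

theorem pvAfold (ys : List Int) (d : PySem.Dict Int Int) (lst : List Int) :
    ys.foldl
      (fun (st : PySem.Dict Int Int × List Int) x =>
        if st.1.contains x then (st.1.insert x (st.1.getD x 0 + 1), st.2)
        else (st.1.insert x 1, st.2 ++ [x])) (d, lst)
    = (ys.foldl (fun d x => d.insert x (d.getD x 0 + 1)) d,
       lst ++ (PySem.List.dedup ys).filter (fun x => !(d.contains x))) := by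
  induction ys generalizing d lst with
  | nil => simp [PySem.List.dedup_eq_ofList, PySem.Set.ofList_nil]
  | cons x ys ih =>
    simp only [List.foldl_cons]
    have hf : ∀ v : Int,
        List.filter (fun y => !(d.insert x v).contains y) (PySem.Set.ofList ys)
          = List.filter (fun y => !d.contains y && !(y == x)) (PySem.Set.ofList ys) := by
      intro v
      apply List.filter_congr
      intro y _
      rw [PySem.Dict.contains_insert]
      cases hyx : y == x <;> simp
    by_cases h : d.contains x
    · rw [if_pos h, ih]
      congr 1
      rw [PySem.List.dedup_eq_ofList, hf]
      rw [PySem.List.dedup_eq_ofList, PySem.Set.ofList_cons]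
      rw [List.filter_cons_of_neg (by simp [h])]
      simp only [PySem.Set.discard, List.filter_filter]
    · rw [if_neg (by simp [h])]
      have h2 : d.insert x 1 = d.insert x (d.getD x 0 + 1) := by
        rw [PySem.Dict.getD_of_not_contains d 0 (by simpa using h), zero_add]
      rw [h2, ih]
      congr 1
      rw [PySem.List.dedup_eq_ofList, hf]
      rw [PySem.List.dedup_eq_ofList, PySem.Set.ofList_cons]
      rw [List.filter_cons_of_pos (by simp [h])]
      simp only [PySem.Set.discard, List.filter_filter, List.append_assoc,
        List.singleton_append]

theorem num_stats_eq_alt (in_list : List Int) : num_stats in_list = num_stats_alt in_list := by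
  unfold num_stats num_stats_alt
  simp only []
  set l := PySem.List.sorted in_list (fun x => x) false with hl
  have hp : l.Pairwise (· ≤ ·) := by
    simpa using PySem.List.sorted_pairwise in_list (fun x => x)
  rw [PySem.List.foldl_pyRange_pyGetD l 0
    (fun (st : PySem.Dict Int Int × List Int) x =>
        if st.1.contains x then (st.1.insert x (st.1.getD x 0 + 1), st.2)
        else (st.1.insert x 1, st.2 ++ [x]))
    (PySem.Dict.empty, ([] : List Int)) le_rfl]
  rw [show ((0:Int).toNat) = 0 from rfl, List.drop_zero, pvAfold]
  rw [PySem.Dict.foldl_insert_getD_add_one_eq_counter, PySem.Dict.items_counter]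
  rw [pvBuildRuns_eq l 0 [], List.drop_zero, List.nil_append, pvRuns_eq l hp]
  have hkeys : (((PySem.List.dedup l).map (fun k => (k, (l.count k : Int)))).map
      (fun p : Int × Int => p.1)) = PySem.List.dedup l := by
    rw [List.map_map]
    conv_rhs => rw [← List.map_id (PySem.List.dedup l)]
    exact List.map_congr_left fun x _ => rfl
  rw [PySem.Dict.items_foldl_insert_fresh _ (fun p : Int × Int => p.1) (fun p : Int × Int => p.2)
    PySem.Dict.empty (by intro a _; exact PySem.Dict.contains_empty _)
    (by rw [List.nil_append, hkeys]; simp [PySem.List.dedup_eq_ofList, PySem.Set.nodup_ofList])]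
  have hrev : PySem.List.sorted (PySem.List.dedup l) (fun x => x) true
      = (PySem.List.dedup l).reverse :=
    PySem.List.sorted_rev_eq_of_perm_of_pairwise_gt _ _ _ (List.reverse_perm _)
      ((List.pairwise_reverse).mpr (by simpa using pvDedup_pairwise_lt l hp))
  simp only [List.nil_append]
  refine Prod.ext ?_ ?_
  · rw [show (PySem.Dict.empty : PySem.Dict Int Int).items = [] from rfl, List.nil_append]
    simp [PySem.List.dedup_eq_ofList]
  · simp only []
    rw [show (List.filter (fun x => !PySem.Dict.empty.contains x) (PySem.List.dedup l))
        = PySem.List.dedup l from List.filter_eq_self.mpr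
          (fun y _ => by simp [PySem.Dict.contains_empty])]
    rw [hrev, List.map_map]
    congr 1
    conv_lhs => rw [← List.map_id (PySem.List.dedup l)]
    exact (List.map_congr_left fun x _ => rfl).symm

-- ===== VERDICT (by name: the statement is the Claim_ definition above) =====
theorem num_stats_spec : Claim_equal_num_stats := by
  intro in_list _
  unfold Spec_num_stats
  exact num_stats_eq_alt in_list
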